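-- pv_equiv track=rewrite | github.com/hunterthesavage/job_application_agent | services/job_store.py | _normalize_token_text
-- ===== SOURCE A (Python) =====
-- from typing import Any
--
-- def _clean(value: Any) -> str:
--     if value is None:
--         return ""
--     text = str(value).strip()
--     if text.lower() == "nan":
--         return ""
--     return text
--
-- def _normalize_token_text(value: Any) -> str:
--     text = _clean(value).lower()
--     if not text:
--         return ""
--     normalized = []
--     last_was_sep = False
--     for ch in text:
--         if ch.isalnum():
--             normalized.append(ch)
--             last_was_sep = False
--         else:
--             if not last_was_sep:
--                 normalized.append(" ")
--             last_was_sep = True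
--     return " ".join("".join(normalized).split())
-- ===== SOURCE B (Python) =====
-- from typing import Any
--
-- def _clean(value: Any) -> str:
--     if value is None:
--         return ""
--     text = str(value).strip()
--     if text.lower() == "nan":
--         return ""
--     return text
--
-- def _normalize_token_text(value: Any) -> str:
--     text = _clean(value).lower()
--     words = []
--     i, n = 0, len(text)
--     while i < n:
--         if text[i].isalnum():
--             j = i + 1
--             while j < n and text[j].isalnum():
--                 j += 1
--             words.append(text[i:j])
--             i = j
--         else:
--             i += 1
--     return " ".join(words)
-- ===== Notes on version B (the rewrite author's own statement) =====
-- stated objective: alternative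
-- what changed: B scans with two index pointers, extracting each maximal alphanumeric run as a whole word slice, instead of A's per-char emission of single-space separator markers with a last_was_sep flag followed by a join/split/join cleanup pass.
import Mathlib
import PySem

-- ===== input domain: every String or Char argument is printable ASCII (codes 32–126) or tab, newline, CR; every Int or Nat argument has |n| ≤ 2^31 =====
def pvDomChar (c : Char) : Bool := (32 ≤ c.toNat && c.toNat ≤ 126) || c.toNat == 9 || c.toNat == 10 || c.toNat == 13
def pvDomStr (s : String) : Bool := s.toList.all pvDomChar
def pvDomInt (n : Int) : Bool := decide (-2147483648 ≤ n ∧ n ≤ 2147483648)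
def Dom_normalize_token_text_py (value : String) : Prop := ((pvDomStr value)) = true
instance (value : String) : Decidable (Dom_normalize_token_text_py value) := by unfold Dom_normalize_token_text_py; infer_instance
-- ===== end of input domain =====

-- B extracts each maximal alphanumeric run as a whole word with a two-pointer scan,
-- instead of A's per-char separator-marker emission with a flag followed by join/split/join.

-- ===== PORT A =====
def cleanA (value : String) : String :=
  let text := PySem.Str.strip value
  if PySem.Str.lower text = "nan" then "" else text

def normalize_token_text_py (value : String) : String :=
  let text := PySem.Str.lower (cleanA value)
  if text.toList = [] then ""
  else
    let st := text.toList.foldl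
      (fun (st : List Char × Bool) ch =>
        if PySem.Chars.isalnum ch then (st.1 ++ [ch], false)
        else if st.2 = false then (st.1 ++ [' '], true)
        else (st.1, true))
      ([], false)
    String.ofList (PySem.Chars.join [' '] (PySem.Chars.split₀ st.1))

-- ===== PORT B =====
def cleanB (value : String) : String :=
  let text := PySem.Str.strip value
  if PySem.Str.lower text = "nan" then "" else text

-- B's outer while loop: at an alnum char the inner while-loop advances j past the
-- maximal alnum run (the takeWhile), the slice text[i:j] is the word, and the scan
-- resumes at j (the dropWhile); at a non-alnum char the pointer advances by one.
def wordsB : List Char → List (List Char)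
  | [] => []
  | c :: rest =>
    if PySem.Chars.isalnum c then
      (c :: rest.takeWhile PySem.Chars.isalnum) :: wordsB (rest.dropWhile PySem.Chars.isalnum)
    else wordsB rest
termination_by cs => cs.length
decreasing_by
  · exact Nat.lt_succ_of_le (List.length_dropWhile_le _ _)
  · simp

def normalize_token_text_py_alt (value : String) : String :=
  let text := PySem.Str.lower (cleanB value)
  String.ofList (PySem.Chars.join [' '] (wordsB text.toList))

-- ===== PRECONDITION & SPEC =====
def Spec_normalize_token_text_py (value : String) (out : String) : Prop := out = normalize_token_text_py_alt value
instance (value : String) (out : String) : Decidable (Spec_normalize_token_text_py value out) := by unfold Spec_normalize_token_text_py; infer_instance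

-- ===== CLAIM (what is proved, stated in full; the proofs are below) =====
def Claim_equal_normalize_token_text_py : Prop := ∀ (value : String), Dom_normalize_token_text_py value → Spec_normalize_token_text_py value (normalize_token_text_py value)

-- ===== LEMMAS AND PROOFS =====

-- A's loop, as structural recursion on the remaining characters (sep = last_was_sep).
def hA : Bool → List Char → List Char
  | _, [] => []
  | sep, c :: cs =>
    if PySem.Chars.isalnum c then c :: hA false cs
    else (if sep then [] else [' ']) ++ hA true cs

-- Proof-side intermediary: character-by-character word accumulation with a pending buffer.
def gB : List Char → List Char → List (List Char)
  | buf, [] => if buf = [] then [] else [buf]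
  | buf, c :: cs =>
    if PySem.Chars.isalnum c then gB (buf ++ [c]) cs
    else (if buf = [] then [] else [buf]) ++ gB [] cs

theorem alnum_not_space (c : Char) (h : PySem.Chars.isalnum c = true) :
    PySem.Chars.isspace c = false := by
  have h65 : 'A'.val.toNat = 65 := by decide
  have h90 : 'Z'.val.toNat = 90 := by decide
  have h97 : 'a'.val.toNat = 97 := by decide
  have h122 : 'z'.val.toNat = 122 := by decide
  have h48 : '0'.val.toNat = 48 := by decide
  have h57 : '9'.val.toNat = 57 := by decide
  simp only [PySem.Chars.isalnum, PySem.Chars.isalpha, PySem.Chars.isdigit, PySem.Chars.isupper,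
    PySem.Chars.islower, PySem.Chars.isspace, Char.le_def, UInt32.le_iff_toNat_le, Char.toNat,
    h65, h90, h97, h122, h48, h57, Bool.or_eq_true, Bool.and_eq_true, decide_eq_true_eq,
    Bool.or_eq_false_iff, Bool.and_eq_false_iff, decide_eq_false_iff_not] at *
  omega

theorem foldA_eq (cs : List Char) : ∀ (norm : List Char) (sep : Bool),
    (cs.foldl
      (fun (st : List Char × Bool) ch =>
        if PySem.Chars.isalnum ch then (st.1 ++ [ch], false)
        else if st.2 = false then (st.1 ++ [' '], true)
        else (st.1, true))
      (norm, sep)).1 = norm ++ hA sep cs := by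
  induction cs with
  | nil => intro norm sep; simp [hA]
  | cons c cs ih =>
    intro norm sep
    by_cases h : PySem.Chars.isalnum c = true
    · simp [List.foldl_cons, h, hA, ih]
    · cases sep <;> simp [List.foldl_cons, h, hA, ih]

-- split₀ of A's spaced-out stream yields exactly the buffered word list gB.
theorem split₀_go_hA (cs : List Char) :
    (∀ (cur : List Char) (acc : List (List Char)),
      PySem.Chars.split₀.go (hA false cs) cur acc = acc.reverse ++ gB cur.reverse cs) ∧
    (∀ (acc : List (List Char)),
      PySem.Chars.split₀.go (hA true cs) [] acc = acc.reverse ++ gB [] cs) := by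
  induction cs with
  | nil =>
    constructor
    · intro cur acc
      by_cases h : cur = [] <;>
        simp [hA, PySem.Chars.split₀.go, gB, h, List.isEmpty_iff]
    · intro acc
      simp [hA, PySem.Chars.split₀.go, gB]
  | cons c cs ih =>
    obtain ⟨ih1, ih2⟩ := ih
    by_cases h : PySem.Chars.isalnum c = true
    · have hns := alnum_not_space c h
      constructor
      · intro cur acc
        simp only [hA, h, if_true, PySem.Chars.split₀.go, hns, Bool.false_eq_true, if_false, gB]
        rw [ih1 (c :: cur) acc]
        simp
      · intro acc
        simp only [hA, h, if_true, PySem.Chars.split₀.go, hns, Bool.false_eq_true, if_false, gB]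
        rw [ih1 [c] acc]
        simp
    · constructor
      · intro cur acc
        simp only [hA, h, if_false, List.cons_append, List.nil_append,
          PySem.Chars.split₀.go, gB, Bool.false_eq_true]
        have hsp : PySem.Chars.isspace ' ' = true := by decide
        by_cases hc : cur = []
        · simp only [hsp, if_true, hc, List.isEmpty_nil, ih2 acc]
          simp
        · simp only [hsp, if_true, List.isEmpty_iff, hc, if_false, ih2 (cur.reverse :: acc)]
          simp [hc]
      · intro acc
        simp only [hA, h, if_false, if_true, List.nil_append, gB, Bool.false_eq_true,
          ih2 acc]

-- The buffered accumulation gB equals B's run-extraction wordsB.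
theorem gB_eq_wordsB (cs : List Char) :
    (∀ buf, buf ≠ [] →
      gB buf cs = (buf ++ cs.takeWhile PySem.Chars.isalnum) ::
        wordsB (cs.dropWhile PySem.Chars.isalnum)) ∧
    gB [] cs = wordsB cs := by
  induction cs with
  | nil =>
    constructor
    · intro buf hb; simp [gB, wordsB, hb]
    · simp [gB, wordsB]
  | cons c cs ih =>
    obtain ⟨ih1, ih2⟩ := ih
    by_cases h : PySem.Chars.isalnum c = true
    · constructor
      · intro buf hb
        simp only [gB, h, if_true, List.takeWhile_cons_of_pos, List.dropWhile_cons_of_pos]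
        rw [ih1 (buf ++ [c]) (by simp)]
        simp
      · simp only [gB, h, if_true, wordsB, List.nil_append]
        rw [ih1 [c] (by simp)]
        simp
    · constructor
      · intro buf hb
        simp only [gB, h, if_false, hb, Bool.false_eq_true,
          ih2]
        simp [h, wordsB]
      · simp only [gB, h, Bool.false_eq_true, if_false, if_true, wordsB, List.nil_append, ih2]

-- ===== VERDICT (by name: the statement is the Claim_ definition above) =====
theorem normalize_token_text_py_spec : Claim_equal_normalize_token_text_py := by
  intro value _
  unfold Spec_normalize_token_text_py normalize_token_text_py normalize_token_text_py_alt cleanA cleanB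
  simp only []
  set text := PySem.Str.lower (if PySem.Str.lower (PySem.Str.strip value) = "nan" then "" else PySem.Str.strip value) with htext
  by_cases h : text.toList = []
  · simp [h, wordsB, PySem.Chars.join, List.intercalate]
  · simp only [h, if_false]
    rw [foldA_eq]
    simp only [List.nil_append]
    have h1 := (split₀_go_hA text.toList).1 [] []
    simp only [List.reverse_nil, List.nil_append] at h1
    rw [PySem.Chars.split₀, h1, (gB_eq_wordsB text.toList).2]
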